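-- pv_equiv track=rewrite | github.com/sai034/KattisSolutions | thisAin'tYourGrandpa'sCheckerboard.py | check
-- ===== SOURCE A (Python) =====
-- def check(string):
--     w = string.count("W")
--     b = string.count("B")
--     if w != b:
--         return False
--     if len(string) < 3:
--         return True
--     for x, y, z in zip(string, string[1:], string[2:]):
--         if x == y and y == z:
--             return False
--     return True
-- ===== SOURCE B (Python) =====
-- def check(string):
--     bal = 0
--     prev = None
--     run = 0
--     ok = True
--     for c in string:
--         if prev == c:
--             run += 1
--         else:
--             prev = c
--             run = 1
--         if run == 3:
--             ok = False
--         if c == 'W':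
--             bal += 1
--         elif c == 'B':
--             bal -= 1
--     return ok and bal == 0
-- ===== Notes on version B (the rewrite author's own statement) =====
-- stated objective: simpler
-- what changed: Replaces A's three separate scans (count('W'), count('B'), and a zip-of-three-slices triple window) by one single pass maintaining a W-B balance counter and the current run length of equal characters.
import Mathlib
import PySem

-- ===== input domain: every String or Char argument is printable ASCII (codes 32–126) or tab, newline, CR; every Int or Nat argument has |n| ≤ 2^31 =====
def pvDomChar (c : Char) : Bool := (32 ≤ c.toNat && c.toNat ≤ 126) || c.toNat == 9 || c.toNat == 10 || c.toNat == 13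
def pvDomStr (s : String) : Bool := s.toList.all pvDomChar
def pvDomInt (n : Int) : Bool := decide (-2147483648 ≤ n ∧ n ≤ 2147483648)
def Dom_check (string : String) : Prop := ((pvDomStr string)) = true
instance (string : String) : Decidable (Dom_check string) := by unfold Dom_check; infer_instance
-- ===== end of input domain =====

-- B replaces A's three separate scans (two count() calls plus a zip of three slices) by one
-- single pass maintaining a W−B balance counter and the current run length of equal characters.

-- ===== PORT A =====
-- the 'for x, y, z in zip(...)' loop: returns False on the first triple of equal chars
def checkLoopA : List ((Char × Char) × Char) → Bool
  | [] => true
  | ((x, y), z) :: rest => if x == y && y == z then false else checkLoopA rest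

def check (string : String) : Bool :=
  let w := PySem.Str.count string "W"
  let b := PySem.Str.count string "B"
  if w ≠ b then false
  else if PySem.Str.len string < 3 then true
  else
    checkLoopA ((string.toList.zip (PySem.Str.slice string (some 1) none).toList).zip
                 (PySem.Str.slice string (some 2) none).toList)

-- ===== PORT B =====
-- one iteration of Source B's loop over state (bal, prev, run, ok)
def stepB (st : Int × Option Char × Int × Bool) (c : Char) : Int × Option Char × Int × Bool :=
  match st with
  | (bal, prev, run, ok) =>
    let pr : Option Char × Int := if prev == some c then (prev, run + 1) else (some c, 1)
    let ok' := if pr.2 == 3 then false else ok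
    let bal' := if c == 'W' then bal + 1 else if c == 'B' then bal - 1 else bal
    (bal', pr.1, pr.2, ok')

def check_alt (string : String) : Bool :=
  let st := string.toList.foldl stepB (0, none, 0, true)
  st.2.2.2 && (st.1 == 0)

-- ===== PRECONDITION & SPEC =====
def Spec_check (string : String) (out : Bool) : Prop := out = check_alt string
instance (string : String) (out : Bool) : Decidable (Spec_check string out) := by unfold Spec_check; infer_instance

-- ===== CLAIM (what is proved, stated in full; the proofs are below) =====
def Claim_equal_check : Prop := ∀ (string : String), Dom_check string → Spec_check string (check string)

-- ===== LEMMAS AND PROOFS =====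

-- s.count("c") for a single character equals List.count
theorem go_singleton (c : Char) : ∀ (fuel : Nat) (l : List Char) (acc : Nat), l.length ≤ fuel →
    PySem.Chars.count.go [c] fuel l acc = acc + l.count c := by
  intro fuel
  induction fuel with
  | zero =>
    intro l acc h
    have hl : l = [] := List.length_eq_zero_iff.mp (Nat.le_zero.mp h)
    subst hl
    simp [PySem.Chars.count.go]
  | succ n ih =>
    intro l acc h
    cases l with
    | nil => simp [PySem.Chars.count.go]
    | cons x t =>
      simp only [PySem.Chars.count.go, List.isPrefixOf, List.drop_one, List.tail_cons]
      by_cases hx : c = x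
      · subst hx
        simp only [BEq.rfl, Bool.true_and]
        have := ih t (acc + 1) (by simpa using h)
        simp only [List.isPrefixOf] at this ⊢
        simp [this, List.count_cons]
        omega
      · have hbe : (c == x) = false := by simp [hx]
        simp only [hbe, Bool.false_and, List.isPrefixOf]
        have := ih t acc (by simpa using h)
        simp [this, List.count_cons, Ne.symm hx]

theorem count_singleton (l : List Char) (c : Char) :
    PySem.Chars.count l [c] = l.count c := by
  simp [PySem.Chars.count, go_singleton c l.length l 0 le_rfl]

-- helper characterisation of A's triple scan
def noTriple : List Char → Bool
  | x :: y :: z :: t => !(x == y && y == z) && noTriple (y :: z :: t)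
  | _ => true

theorem zipTriples : ∀ l : List Char,
    checkLoopA ((l.zip (l.drop 1)).zip (l.drop 2)) = noTriple l
  | [] => by simp [checkLoopA, noTriple]
  | [x] => by simp [checkLoopA, noTriple]
  | [x, y] => by simp [checkLoopA, noTriple]
  | x :: y :: z :: t => by
    have ih := zipTriples (y :: z :: t)
    simp only [List.drop_succ_cons, List.drop_zero, List.drop_one, List.tail_cons,
      List.zip_cons_cons, checkLoopA] at ih ⊢
    by_cases hxy : x = y
    · by_cases hyz : y = z
      · simp [hxy, hyz, noTriple]
      · simp [hxy, hyz, noTriple, ih]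
    · simp [hxy, noTriple, ih]

theorem noTriple_short (l : List Char) (h : l.length < 3) : noTriple l = true := by
  match l, h with
  | [], _ => rfl
  | [x], _ => rfl
  | [x, y], _ => rfl

theorem noTriple_ne (x y : Char) (t : List Char) (h : x ≠ y) :
    noTriple (x :: y :: t) = noTriple (y :: t) := by
  cases t with
  | nil => rfl
  | cons z u => simp [noTriple, h]

-- Source B's run tracking, from an arbitrary (prev, run) state
def runsFine : Char → Int → List Char → Bool
  | _, _, [] => true
  | p, r, c :: t =>
    let r' := if c == p then r + 1 else 1
    !(r' == 3) && runsFine c r' t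

theorem runsFine_noTriple : ∀ t : List Char,
    (∀ x, runsFine x 1 t = noTriple (x :: t)) ∧
    (∀ y, runsFine y 2 t = noTriple (y :: y :: t)) := by
  intro t
  induction t with
  | nil =>
    constructor <;> intro x <;> simp [runsFine, noTriple]
  | cons c t ih =>
    constructor
    · intro x
      by_cases hcx : c = x
      · subst hcx
        have := ih.2 c
        simp [runsFine, noTriple, this]
      · have := ih.1 c
        rw [noTriple_ne x c t (Ne.symm hcx), ← this]
        simp [runsFine, hcx]
    · intro y
      by_cases hcy : c = y
      · subst hcy
        simp [runsFine, noTriple]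
      · have := ih.1 c
        rw [show noTriple (y :: y :: c :: t) = noTriple (y :: c :: t) by
              simp [noTriple, Ne.symm hcy],
            noTriple_ne y c t (Ne.symm hcy), ← this]
        simp [runsFine, hcy]

-- the ok component of Source B's fold
theorem fold_ok : ∀ (t : List Char) (bal : Int) (p : Char) (r : Int) (o : Bool),
    (t.foldl stepB (bal, some p, r, o)).2.2.2 = (o && runsFine p r t) := by
  intro t
  induction t with
  | nil => intro bal p r o; simp [runsFine]
  | cons c t ih =>
    intro bal p r o
    by_cases hpc : p = c
    · subst hpc
      have hstep : stepB (bal, some p, r, o) p =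
          ((if p == 'W' then bal + 1 else if p == 'B' then bal - 1 else bal),
            some p, r + 1, (if r + 1 == 3 then false else o)) := by
        simp [stepB]
      rw [List.foldl_cons, hstep, ih]
      by_cases h3 : r + 1 = 3
      · simp [runsFine, h3]
      · have h3' : (r + 1 == 3) = false := by simp [h3]
        simp [runsFine, h3']
    · have hstep : stepB (bal, some p, r, o) c =
          ((if c == 'W' then bal + 1 else if c == 'B' then bal - 1 else bal),
            some c, 1, o) := by
        simp [stepB, hpc]
      rw [List.foldl_cons, hstep, ih]
      simp [runsFine, Ne.symm hpc]

-- the balance component of Source B's fold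
theorem fold_bal : ∀ (t : List Char) (bal : Int) (pr : Option Char) (r : Int) (o : Bool),
    (t.foldl stepB (bal, pr, r, o)).1 = bal + (t.count 'W' : Int) - t.count 'B' := by
  intro t
  induction t with
  | nil => intro bal pr r o; simp
  | cons c t ih =>
    intro bal pr r o
    rcases hs : stepB (bal, pr, r, o) c with ⟨bal2, pr2, r2, o2⟩
    have hbal2 : bal2 = if c == 'W' then bal + 1 else if c == 'B' then bal - 1 else bal := by
      have h1 := congrArg Prod.fst hs
      simp only [stepB] at h1
      exact h1.symm
    rw [List.foldl_cons, hs, ih, hbal2]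
    by_cases hW : c = 'W'
    · simp only [hW, List.count_cons]
      simp
      push_cast
      ring
    · by_cases hB : c = 'B'
      · simp only [hB, List.count_cons]
        simp
        push_cast
        ring
      · simp [List.count_cons, hW, hB]

-- B computed on the character list
theorem check_alt_eq (string : String) :
    check_alt string =
      (noTriple string.toList &&
        ((string.toList.count 'W' : Int) - string.toList.count 'B' == 0)) := by
  unfold check_alt
  cases hl : string.toList with
  | nil => simp [hl, noTriple]
  | cons c t =>
    simp only [hl, List.foldl_cons]
    have hstep : stepB (0, none, 0, true) c =
        ((if c == 'W' then (1 : Int) else if c == 'B' then -1 else 0), some c, 1, true) := by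
      simp only [stepB]
      norm_num
    rw [hstep]
    rw [fold_bal t _ (some c) 1 true]
    have hok := fold_ok t (if c == 'W' then (1 : Int) else if c == 'B' then -1 else 0) c 1 true
    have h1 := (runsFine_noTriple t).1 c
    rw [hok, h1]
    simp only [Bool.true_and]
    congr 1
    -- balance values agree
    have hbal : (if c == 'W' then (1 : Int) else if c == 'B' then -1 else 0)
        + (t.count 'W' : Int) - t.count 'B'
        = ((c :: t).count 'W' : Int) - (c :: t).count 'B' := by
      by_cases hW : c = 'W'
      · simp only [hW, List.count_cons]
        simp
        push_cast
        ring
      · by_cases hB : c = 'B'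
        · simp only [hB, List.count_cons]
          simp
          push_cast
          ring
        · simp [List.count_cons, hW, hB]
    rw [hbal]

-- ===== VERDICT (by name: the statement is the Claim_ definition above) =====
theorem check_spec : Claim_equal_check := by
  unfold Claim_equal_check
  intro string _
  unfold Spec_check check
  rw [check_alt_eq]
  have hW : PySem.Str.count string "W" = string.toList.count 'W' := by
    rw [show PySem.Str.count string "W" = PySem.Chars.count string.toList ['W'] by simp,
        count_singleton]
  have hB : PySem.Str.count string "B" = string.toList.count 'B' := by
    rw [show PySem.Str.count string "B" = PySem.Chars.count string.toList ['B'] by simp,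
        count_singleton]
  have hzip : checkLoopA ((string.toList.zip (PySem.Str.slice string (some 1) none).toList).zip
      (PySem.Str.slice string (some 2) none).toList) = noTriple string.toList := by
    have h1 : (PySem.Str.slice string (some 1) none).toList = string.toList.drop 1 := by
      simp [PySem.List.slice_from_one]
    have h2 : (PySem.Str.slice string (some 2) none).toList = string.toList.drop 2 := by
      simp
      rw [show (some (2:Int)) = some ((2:Nat):Int) by norm_num, PySem.List.slice_from_natCast]
    rw [h1, h2, zipTriples]
  rw [hW, hB, hzip]
  by_cases h : string.toList.count 'W' = string.toList.count 'B'
  · rw [if_neg (by simp [h])]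
    have hbal : ((string.toList.count 'W' : Int) - string.toList.count 'B' == 0) = true := by
      simp [h]
    rw [hbal, Bool.and_true]
    by_cases hlen : PySem.Str.len string < 3
    · rw [if_pos hlen]
      have hl3 : string.toList.length < 3 := by
        have hle := PySem.Str.len_eq string
        omega
      rw [noTriple_short _ hl3]
    · rw [if_neg hlen]
  · rw [if_pos h]
    have hbal : ((string.toList.count 'W' : Int) - string.toList.count 'B' == 0) = false := by
      rw [beq_eq_false_iff_ne]
      intro hc
      exact h (by exact_mod_cast sub_eq_zero.mp hc)
    rw [hbal, Bool.and_false]
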